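-- pv_equiv track=rewrite | github.com/t73fde/pynullweb | pynullweb/handler.py | is_localhost
-- ===== SOURCE A (Python) =====
-- def is_localhost(host, localhosts):
--     # type: (str, Tuple[str, ...]) -> bool
--     """Check if request is for local host."""
--     if not host:
--         return True
--     for localhost in localhosts:
--         if host == localhost:
--             return True
--         if host.startswith(localhost + ":"):
--             return True
--     return False
-- ===== SOURCE B (Python) =====
-- def is_localhost(host, localhosts):
--     """Check if request is for local host."""
--     if not host:
--         return True
--     candidates = set(localhosts)
--     if host in candidates:
--         return True
--     prefix = []
--     for ch in host:
--         if ch == ':' and ''.join(prefix) in candidates: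
--             return True
--         prefix.append(ch)
--     return False
-- ===== Notes on version B (the rewrite author's own statement) =====
-- stated objective: alternative
-- what changed: Replaces the per-candidate ==/startswith scan by a set of candidates plus a single left-to-right pass over the host that tests the prefix before each colon for membership.
import Mathlib
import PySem

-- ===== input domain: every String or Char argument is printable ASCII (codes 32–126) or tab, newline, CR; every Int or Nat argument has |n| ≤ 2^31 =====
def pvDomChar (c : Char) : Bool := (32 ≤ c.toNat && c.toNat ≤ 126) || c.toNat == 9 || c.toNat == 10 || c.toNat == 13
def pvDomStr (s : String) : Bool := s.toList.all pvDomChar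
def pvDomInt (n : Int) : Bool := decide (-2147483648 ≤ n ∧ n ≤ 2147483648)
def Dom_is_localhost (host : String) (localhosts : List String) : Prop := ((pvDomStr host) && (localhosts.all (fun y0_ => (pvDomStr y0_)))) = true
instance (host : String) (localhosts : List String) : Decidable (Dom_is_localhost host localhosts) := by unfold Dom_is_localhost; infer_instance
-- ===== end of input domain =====

-- B replaces the per-candidate ==/startswith scan by one set of candidates plus a single
-- left-to-right pass over the host that tests the prefix before each colon (objective: alternative).

-- ===== PORT A =====
def is_localhost (host : String) (localhosts : List String) : Bool :=
  if host = "" then true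
  else
    localhosts.any (fun localhost =>
      host == localhost || PySem.Str.startswith host (localhost ++ ":"))

-- ===== PORT B =====
-- the `for ch in host` loop of Source B, carrying the growing prefix list
def altLoop (candidates : PySem.Set String) (pref : List Char) : List Char → Bool
  | [] => false
  | ch :: rest =>
    if ch == ':' && PySem.Set.contains candidates (String.ofList pref) then true
    else altLoop candidates (pref ++ [ch]) rest

def is_localhost_alt (host : String) (localhosts : List String) : Bool :=
  if host = "" then true
  else
    let candidates := PySem.Set.ofList localhosts
    if PySem.Set.contains candidates host then true
    else altLoop candidates [] host.toList

-- ===== PRECONDITION & SPEC =====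
def Spec_is_localhost (host : String) (localhosts : List String) (out : Bool) : Prop := out = is_localhost_alt host localhosts
instance (host : String) (localhosts : List String) (out : Bool) : Decidable (Spec_is_localhost host localhosts out) := by unfold Spec_is_localhost; infer_instance

-- ===== CLAIM (what is proved, stated in full; the proofs are below) =====
def Claim_equal_is_localhost : Prop := ∀ (host : String) (localhosts : List String), Dom_is_localhost host localhosts → Spec_is_localhost host localhosts (is_localhost host localhosts)

-- ===== LEMMAS AND PROOFS =====

theorem contains_ofList_iff (x : String) (xs : List String) :
    PySem.Set.contains (PySem.Set.ofList xs) x = true ↔ x ∈ xs := by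
  simp [PySem.Set.contains, PySem.Set.mem_ofList]

-- B's loop returns true iff some colon in the remaining input has its (pref-extended) prefix in the set
theorem altLoop_iff (xs : List String) :
    ∀ (rest pref : List Char),
      altLoop (PySem.Set.ofList xs) pref rest = true ↔
        ∃ p q, rest = p ++ ':' :: q ∧ String.ofList (pref ++ p) ∈ xs := by
  intro rest
  induction rest with
  | nil =>
      intro pref
      simp [altLoop]
  | cons ch rs ih =>
      intro pref
      simp only [altLoop]
      by_cases hc : (ch == ':' && PySem.Set.contains (PySem.Set.ofList xs) (String.ofList pref)) = true
      · simp only [hc, if_pos]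
        simp only [Bool.and_eq_true, beq_iff_eq] at hc
        obtain ⟨hch', hmem⟩ := hc
        constructor
        · intro _
          exact ⟨[], rs, by simp [hch'], by simpa using (contains_ofList_iff _ xs).mp hmem⟩
        · intro _; trivial
      · simp only [hc, if_neg, Bool.false_eq_true, not_false_iff]
        rw [ih (pref ++ [ch])]
        constructor
        · rintro ⟨p, q, hrs, hmem⟩
          exact ⟨ch :: p, q, by simp [hrs], by simpa using hmem⟩
        · rintro ⟨p, q, heq, hmem⟩
          cases p with
          | nil =>
              exfalso
              simp only [List.nil_append] at heq
              have hch : ch = ':' := (List.cons.inj heq).1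
              apply hc
              simp only [Bool.and_eq_true, beq_iff_eq]
              exact ⟨hch, (contains_ofList_iff _ xs).mpr (by simpa using hmem)⟩
          | cons c' p' =>
              have h1 : ch = c' := (List.cons.inj heq).1
              have h2 : rs = p' ++ ':' :: q := (List.cons.inj heq).2
              exact ⟨p', q, h2, by simpa [h1] using hmem⟩

-- A's startswith test, phrased as a split of host at a colon
theorem startswith_colon_iff (host lh : String) :
    PySem.Str.startswith host (lh ++ ":") = true ↔
      ∃ q, host.toList = lh.toList ++ ':' :: q := by
  simp only [PySem.Str.startswith_eq, PySem.Chars.startswith_iff]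
  constructor
  · rintro ⟨t, ht⟩
    exact ⟨t, by simpa using ht.symm⟩
  · rintro ⟨q, hq⟩
    exact ⟨q, by simpa using hq.symm⟩

-- ===== VERDICT (by name: the statement is the Claim_ definition above) =====
theorem is_localhost_spec : Claim_equal_is_localhost := by
  intro host localhosts _
  unfold Spec_is_localhost is_localhost is_localhost_alt
  by_cases h0 : host = ""
  · simp [h0]
  · simp only [h0, if_neg, not_false_iff]
    by_cases hin : PySem.Set.contains (PySem.Set.ofList localhosts) host = true
    · simp only [hin, if_pos]
      have hmem : host ∈ localhosts := (contains_ofList_iff _ _).mp hin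
      rw [List.any_eq_true]
      exact ⟨host, hmem, by simp⟩
    · simp only [hin, if_neg, Bool.false_eq_true, not_false_iff]
      rw [Bool.eq_iff_iff, List.any_eq_true, altLoop_iff localhosts host.toList []]
      constructor
      · rintro ⟨lh, hlh, hor⟩
        simp only [Bool.or_eq_true, beq_iff_eq] at hor
        rcases hor with heq | hsw
        · exact absurd ((contains_ofList_iff _ _).mpr (heq ▸ hlh)) hin
        · rcases (startswith_colon_iff host lh).mp hsw with ⟨q, hq⟩
          exact ⟨lh.toList, q, by simpa using hq, by simpa using hlh⟩
      · rintro ⟨p, q, hsplit, hmem⟩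
        refine ⟨String.ofList p, by simpa using hmem, ?_⟩
        simp only [Bool.or_eq_true]
        exact Or.inr ((startswith_colon_iff host (String.ofList p)).mpr ⟨q, by simpa using hsplit⟩)
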